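-- pv_equiv track=rewrite | github.com/ttsiodras/utils | clean-template-mess.py | format_cpp_type
-- ===== SOURCE A (Python) =====
-- def count_commas_in_template(text, start_pos):
--     """Count commas in a template starting from '<' position."""
--     depth = 0
--     comma_count = 0
--     i = start_pos
--
--     while i < len(text):
--         if text[i] == '<':
--             depth += 1
--         elif text[i] == '>':
--             depth -= 1
--             if depth == 0:
--                 return comma_count
--         elif text[i] == ',' and depth == 1:
--             comma_count += 1
--         i += 1
--
--     return comma_count
--
-- def format_cpp_type(text):
--     """Format C++ type with indentation like jq does for JSON.
--     Single-argument templates stay on one line."""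
--     result = []
--     indent = 0
--     i = 0
--
--     while i < len(text):
--         char = text[i]
--
--         if char == '<':
--             # Check if this is a single-argument template
--             comma_count = count_commas_in_template(text, i)
--
--             if comma_count == 0:
--                 # Single argument - keep on same line
--                 # Find the matching '>'
--                 depth = 0
--                 j = i
--                 while j < len(text):
--                     if text[j] == '<':
--                         depth += 1
--                     elif text[j] == '>':
--                         depth -= 1
--                         if depth == 0:
--                             # Copy everything from '<' to '>' inclusive
--                             result.append(text[i:j+1])
--                             i = j
--                             break
--                     j += 1
--             else:
--                 # Multiple arguments - format with newlines
--                 result.append(char)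
--                 result.append('\n')
--                 indent += 2
--                 result.append(' ' * indent)
--         elif char == '>':
--             result.append('\n')
--             indent -= 2
--             result.append(' ' * indent)
--             result.append(char)
--         elif char == ',':
--             result.append(char)
--             # Look ahead to see if there's a space
--             if i + 1 < len(text) and text[i + 1] == ' ':
--                 i += 1  # Skip the space
--             result.append('\n')
--             result.append(' ' * indent)
--         else:
--             result.append(char)
--
--         i += 1
--
--     return ''.join(result)
-- ===== SOURCE B (Python) =====
-- def format_cpp_type(text):
--     """Format C++ type with indentation like jq does for JSON.
--     Single-argument templates stay on one line."""
--     n = len(text)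
--     # One stack pass: for every '<' record its matching '>' and its depth-1 comma count.
--     match = {}
--     commas = {}
--     stack = []
--     for i, ch in enumerate(text):
--         if ch == '<':
--             stack.append(i)
--             commas[i] = 0
--         elif ch == '>':
--             if stack:
--                 match[stack.pop()] = i
--         elif ch == ',':
--             if stack:
--                 commas[stack[-1]] += 1
--     out = []
--     indent = 0
--     i = 0
--     while i < n:
--         ch = text[i]
--         if ch == '<':
--             if commas[i] == 0:
--                 j = match.get(i)
--                 if j is not None:
--                     out.append(text[i:j + 1])
--                     i = j + 1
--                 else:
--                     i += 1  # unmatched '<' with no top-level comma: emitted nothing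
--                 continue
--             indent += 2
--             out.append('<\n' + ' ' * indent)
--         elif ch == '>':
--             out.append('\n' + ' ' * max(indent - 2, 0) + '>')
--             indent -= 2
--         elif ch == ',':
--             if i + 1 < n and text[i + 1] == ' ':
--                 i += 1
--             out.append(',\n' + ' ' * max(indent, 0))
--         else:
--             out.append(ch)
--         i += 1
--     return ''.join(out)
-- ===== Notes on version B (the rewrite author's own statement) =====
-- stated objective: alternative
-- what changed: A rescans the string from every '<' (one scan to count depth-1 commas, another to find the matching '>'); B precomputes both tables for all '<' positions in a single stack pass and then emits in one table-driven pass.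
import Mathlib
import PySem

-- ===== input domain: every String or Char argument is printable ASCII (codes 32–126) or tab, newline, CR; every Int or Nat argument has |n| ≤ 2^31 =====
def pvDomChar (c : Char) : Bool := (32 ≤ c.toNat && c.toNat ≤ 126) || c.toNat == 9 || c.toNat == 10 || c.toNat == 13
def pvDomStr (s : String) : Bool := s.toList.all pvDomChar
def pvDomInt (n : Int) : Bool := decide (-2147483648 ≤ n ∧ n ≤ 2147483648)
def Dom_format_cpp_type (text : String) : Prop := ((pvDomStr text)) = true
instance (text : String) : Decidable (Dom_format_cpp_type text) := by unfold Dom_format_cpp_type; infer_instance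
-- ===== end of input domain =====

-- B replaces A's per-'<' rescans (one scan counting depth-1 commas, one finding the
-- matching '>') by a single stack pass that precomputes both tables for every '<',
-- followed by one table-driven emit pass: a different algorithm, same output.

-- ' ' * indent (empty for negative indent), shared by both ports
def pvSpaces (indent : Int) : List Char := List.replicate indent.toNat ' '

-- ===== PORT A =====

-- count_commas_in_template's while loop (depth, comma_count, i as in A)
def ccit (cs : List Char) (i : Nat) (depth : Int) (commas : Nat) : Nat :=
  if h : i < cs.length then
    if cs[i] = '<' then ccit cs (i + 1) (depth + 1) commas
    else if cs[i] = '>' then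
      if depth - 1 = 0 then commas else ccit cs (i + 1) (depth - 1) commas
    else if cs[i] = ',' ∧ depth = 1 then ccit cs (i + 1) depth (commas + 1)
    else ccit cs (i + 1) depth commas
  else commas
termination_by cs.length - i

-- the inner "find the matching '>'" while loop of A's '<' branch
def fm (cs : List Char) (j : Nat) (depth : Int) : Option Nat :=
  if h : j < cs.length then
    if cs[j] = '<' then fm cs (j + 1) (depth + 1)
    else if cs[j] = '>' then
      if depth - 1 = 0 then some j else fm cs (j + 1) (depth - 1)
    else fm cs (j + 1) depth
  else none
termination_by cs.length - j

-- A's main while loop; fuel = number of iterations still allowed (i strictly grows each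
-- iteration, so cs.length + 1 fuel is enough — the guard only makes the recursion total)
def loopA (cs : List Char) (fuel : Nat) (i : Nat) (indent : Int) (acc : List Char) : List Char :=
  match fuel with
  | 0 => acc
  | fuel + 1 =>
    if h : i < cs.length then
      if cs[i] = '<' then
        if ccit cs i 0 0 = 0 then
          match fm cs i 0 with
          | some j => loopA cs fuel (j + 1) indent (acc ++ (cs.drop i).take (j + 1 - i))  -- text[i:j+1], exact: 0 ≤ i ≤ j+1
          | none => loopA cs fuel (i + 1) indent acc
        else loopA cs fuel (i + 1) (indent + 2) (acc ++ '<' :: '\n' :: pvSpaces (indent + 2))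
      else if cs[i] = '>' then
        loopA cs fuel (i + 1) (indent - 2) (acc ++ '\n' :: pvSpaces (indent - 2) ++ ['>'])
      else if cs[i] = ',' then
        if i + 1 < cs.length ∧ cs.getD (i + 1) ' ' = ' ' then
          loopA cs fuel (i + 2) indent (acc ++ ',' :: '\n' :: pvSpaces indent)
        else
          loopA cs fuel (i + 1) indent (acc ++ ',' :: '\n' :: pvSpaces indent)
      else loopA cs fuel (i + 1) indent (acc ++ [cs[i]])
    else acc

def format_cpp_type (text : String) : String :=
  String.ofList (loopA text.toList (text.toList.length + 1) 0 0 [])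

-- ===== PORT B =====

-- B's first pass: one stack walk over enumerate(text) filling the two dicts
def pass1 : List Char → Nat → List Nat → PySem.Dict Nat Nat → PySem.Dict Nat Nat →
    PySem.Dict Nat Nat × PySem.Dict Nat Nat
  | [], _, _, cd, md => (cd, md)
  | c :: rest, i, st, cd, md =>
    if c = '<' then pass1 rest (i + 1) (i :: st) (cd.insert i 0) md
    else if c = '>' then
      match st with
      | p :: st' => pass1 rest (i + 1) st' cd (md.insert p i)
      | [] => pass1 rest (i + 1) [] cd md
    else if c = ',' then
      match st with
      | p :: _ => pass1 rest (i + 1) st (cd.modify p 0 (· + 1)) md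
      | [] => pass1 rest (i + 1) st cd md
    else pass1 rest (i + 1) st cd md

-- B's emit pass: same while loop, but table lookups instead of rescans
def loopB (cs : List Char) (cd md : PySem.Dict Nat Nat) (fuel : Nat) (i : Nat)
    (indent : Int) (acc : List Char) : List Char :=
  match fuel with
  | 0 => acc
  | fuel + 1 =>
    if h : i < cs.length then
      if cs[i] = '<' then
        if cd.getD i 0 = 0 then
          match md.get? i with
          | some j => loopB cs cd md fuel (j + 1) indent (acc ++ (cs.drop i).take (j + 1 - i))
          | none => loopB cs cd md fuel (i + 1) indent acc
        else loopB cs cd md fuel (i + 1) (indent + 2) (acc ++ '<' :: '\n' :: pvSpaces (indent + 2))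
      else if cs[i] = '>' then
        loopB cs cd md fuel (i + 1) (indent - 2) (acc ++ '\n' :: pvSpaces (indent - 2) ++ ['>'])
      else if cs[i] = ',' then
        if i + 1 < cs.length ∧ cs.getD (i + 1) ' ' = ' ' then
          loopB cs cd md fuel (i + 2) indent (acc ++ ',' :: '\n' :: pvSpaces indent)
        else
          loopB cs cd md fuel (i + 1) indent (acc ++ ',' :: '\n' :: pvSpaces indent)
      else loopB cs cd md fuel (i + 1) indent (acc ++ [cs[i]])
    else acc

def format_cpp_type_alt (text : String) : String :=
  let cs := text.toList
  let t := pass1 cs 0 [] PySem.Dict.empty PySem.Dict.empty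
  String.ofList (loopB cs t.1 t.2 (cs.length + 1) 0 0 [])

-- ===== PRECONDITION & SPEC =====
def Spec_format_cpp_type (text : String) (out : String) : Prop := out = format_cpp_type_alt text
instance (text : String) (out : String) : Decidable (Spec_format_cpp_type text out) := by unfold Spec_format_cpp_type; infer_instance

-- ===== CLAIM (what is proved, stated in full; the proofs are below) =====
def Claim_equal_format_cpp_type : Prop := ∀ (text : String), Dom_format_cpp_type text → Spec_format_cpp_type text (format_cpp_type text)

-- ===== LEMMAS AND PROOFS =====

lemma ccit_oob (cs : List Char) (i : Nat) (d : Int) (c : Nat) (h : cs.length ≤ i) :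
    ccit cs i d c = c := by
  rw [ccit]; simp [Nat.not_lt.mpr h]

lemma ccit_lt (cs : List Char) (i : Nat) (d : Int) (c : Nat) (h : i < cs.length)
    (hc : cs[i] = '<') : ccit cs i d c = ccit cs (i + 1) (d + 1) c := by
  rw [ccit]; simp [h, hc]

lemma ccit_gt_ret (cs : List Char) (i : Nat) (c : Nat) (h : i < cs.length)
    (hc : cs[i] = '>') : ccit cs i 1 c = c := by
  rw [ccit]; simp [h, hc]

lemma ccit_gt (cs : List Char) (i : Nat) (d : Int) (c : Nat) (h : i < cs.length)
    (hc : cs[i] = '>') (hd : d ≠ 1) : ccit cs i d c = ccit cs (i + 1) (d - 1) c := by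
  rw [ccit]; simp [h, hc, sub_eq_zero, hd]

lemma ccit_comma1 (cs : List Char) (i : Nat) (c : Nat) (h : i < cs.length)
    (hc : cs[i] = ',') : ccit cs i 1 c = ccit cs (i + 1) 1 (c + 1) := by
  rw [ccit]; simp [h, hc]

lemma ccit_other (cs : List Char) (i : Nat) (d : Int) (c : Nat) (h : i < cs.length)
    (h1 : cs[i] ≠ '<') (h2 : cs[i] ≠ '>') (h3 : ¬ (cs[i] = ',' ∧ d = 1)) :
    ccit cs i d c = ccit cs (i + 1) d c := by
  rw [ccit]; simp [h, h1, h2, h3]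

lemma fm_oob (cs : List Char) (j : Nat) (d : Int) (h : cs.length ≤ j) :
    fm cs j d = none := by
  rw [fm]; simp [Nat.not_lt.mpr h]

lemma fm_lt (cs : List Char) (j : Nat) (d : Int) (h : j < cs.length)
    (hc : cs[j] = '<') : fm cs j d = fm cs (j + 1) (d + 1) := by
  rw [fm]; simp [h, hc]

lemma fm_gt_ret (cs : List Char) (j : Nat) (h : j < cs.length)
    (hc : cs[j] = '>') : fm cs j 1 = some j := by
  rw [fm]; simp [h, hc]

lemma fm_gt (cs : List Char) (j : Nat) (d : Int) (h : j < cs.length)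
    (hc : cs[j] = '>') (hd : d ≠ 1) : fm cs j d = fm cs (j + 1) (d - 1) := by
  rw [fm]; simp [h, hc, sub_eq_zero, hd]

lemma fm_other (cs : List Char) (j : Nat) (d : Int) (h : j < cs.length)
    (h1 : cs[j] ≠ '<') (h2 : cs[j] ≠ '>') : fm cs j d = fm cs (j + 1) d := by
  rw [fm]; simp [h, h1, h2]

-- the pass1 invariant, by induction on the remaining length
lemma pass1_correct_aux (cs : List Char) :
    ∀ (k i : Nat) (st : List Nat) (cd md : PySem.Dict Nat Nat),
      i + k = cs.length →
      st.Nodup →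
      (∀ p ∈ st, p < i ∧ ∃ hp : p < cs.length, cs[p] = '<') →
      (∀ j (hj : j < st.length),
          ccit cs st[j] 0 0 = ccit cs i ((j : Int) + 1) (cd.getD st[j] 0) ∧
          fm cs st[j] 0 = fm cs i ((j : Int) + 1)) →
      (∀ q, (md.get? q).isSome → q < i) →
      (∀ q v, md.get? q = some v → q ∉ st ∧ fm cs q 0 = some v ∧ cd.getD q 0 = ccit cs q 0 0) →
      (∀ q, q < i → ∀ hq : q < cs.length, cs[q] = '<' → q ∈ st ∨ (md.get? q).isSome) →
      ∀ p (hp : p < cs.length), cs[p] = '<' →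
        ((pass1 (cs.drop i) i st cd md).1.getD p 0 = ccit cs p 0 0 ∧
         (pass1 (cs.drop i) i st cd md).2.get? p = fm cs p 0) := by
  intro k
  induction k with
  | zero =>
    intro i st cd md hlen hnd hst h1 hmlt h3 h4 p hp hc
    have hi : i = cs.length := by omega
    subst hi
    rw [List.drop_length]
    simp only [pass1]
    rcases h4 p hp hp hc with hmem | hsome
    · obtain ⟨j, hj, hpj⟩ := List.mem_iff_getElem.mp hmem
      obtain ⟨hcc, hfm⟩ := h1 j hj
      rw [hpj] at hcc hfm
      constructor
      · rw [hcc, ccit_oob _ _ _ _ (le_refl _)]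
      · rw [hfm, fm_oob _ _ _ (le_refl _)]
        cases hmp : md.get? p with
        | none => rfl
        | some v => exact absurd hmem (h3 p v hmp).1
    · obtain ⟨v, hv⟩ := Option.isSome_iff_exists.mp hsome
      obtain ⟨_, hfm, hcd⟩ := h3 p v hv
      exact ⟨hcd, by rw [hv, hfm]⟩
  | succ k ih =>
    intro i st cd md hlen hnd hst h1 hmlt h3 h4 p hp hc
    have hi : i < cs.length := by omega
    rw [List.drop_eq_getElem_cons hi]
    by_cases hA : cs[i] = '<'
    · -- push i
      simp only [pass1, if_pos hA]
      have hnotin : i ∉ st := fun hmem => absurd (hst i hmem).1 (lt_irrefl i)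
      refine ih (i + 1) (i :: st) (cd.insert i 0) md (by omega)
        (List.nodup_cons.mpr ⟨hnotin, hnd⟩) ?_ ?_ ?_ ?_ ?_ p hp hc
      · intro q hq
        rcases List.mem_cons.mp hq with rfl | hq'
        · exact ⟨by omega, hi, hA⟩
        · exact ⟨by have := (hst q hq').1; omega, (hst q hq').2⟩
      · intro j hj
        match j with
        | 0 =>
          simp only [List.getElem_cons_zero, PySem.Dict.getD_insert_self]
          push_cast
          exact ⟨ccit_lt cs i 0 0 hi hA, fm_lt cs i 0 hi hA⟩
        | j + 1 =>
          simp only [List.getElem_cons_succ]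
          have hjlt : j < st.length := by simpa using hj
          have hne : st[j] ≠ i := by
            intro hEq; exact hnotin (hEq ▸ List.getElem_mem hjlt)
          obtain ⟨hcc, hfm⟩ := h1 j hjlt
          rw [PySem.Dict.getD_insert_of_ne _ _ _ hne]
          constructor
          · rw [hcc, ccit_lt cs i _ _ hi hA]; push_cast; ring_nf
          · rw [hfm, fm_lt cs i _ hi hA]; push_cast; ring_nf
      · intro q hq; have := hmlt q hq; omega
      · intro q v hv
        obtain ⟨hq1, hq2, hq3⟩ := h3 q v hv
        have hqi : q ≠ i := by have := hmlt q (by simp [hv]); omega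
        refine ⟨by simp [List.mem_cons, hqi, hq1], hq2, ?_⟩
        rw [PySem.Dict.getD_insert_of_ne _ _ _ hqi, hq3]
      · intro q hq hq' hcq
        rcases Nat.lt_succ_iff_lt_or_eq.mp hq with hq2 | rfl
        · rcases h4 q hq2 hq' hcq with hmem | hsome
          · exact Or.inl (List.mem_cons_of_mem _ hmem)
          · exact Or.inr hsome
        · exact Or.inl List.mem_cons_self
    · by_cases hB : cs[i] = '>'
      · cases st with
        | nil =>
          simp only [pass1, if_neg hA, if_pos hB]
          refine ih (i + 1) [] cd md (by omega) hnd (by simp)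
            (by intro j hj; simp at hj) (fun q hq => by have := hmlt q hq; omega) h3 ?_ p hp hc
          intro q hq hq' hcq
          rcases Nat.lt_succ_iff_lt_or_eq.mp hq with hq2 | rfl
          · rcases h4 q hq2 hq' hcq with hmem | hsome
            · simp at hmem
            · exact Or.inr hsome
          · exact absurd hcq (by rw [hB]; decide)
        | cons t st' =>
          simp only [pass1, if_neg hA, if_pos hB]
          have htlt : t < i := (hst t List.mem_cons_self).1
          obtain ⟨htop_c, htop_f⟩ := h1 0 (by simp)
          simp only [List.getElem_cons_zero] at htop_c htop_f
          norm_num at htop_c htop_f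
          have htnotin : t ∉ st' := (List.nodup_cons.mp hnd).1
          refine ih (i + 1) st' cd (md.insert t i) (by omega) (List.nodup_cons.mp hnd).2
            (fun q hq => ⟨by have := (hst q (List.mem_cons_of_mem _ hq)).1; omega,
              (hst q (List.mem_cons_of_mem _ hq)).2⟩) ?_ ?_ ?_ ?_ p hp hc
          · intro j hj
            have hj1 : j + 1 < (t :: st').length := by simpa using hj
            obtain ⟨hcc, hfm⟩ := h1 (j + 1) hj1
            simp only [List.getElem_cons_succ] at hcc hfm
            have hd : ((j : Int) + 1) + 1 ≠ 1 := by omega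
            constructor
            · rw [hcc, ccit_gt cs i _ _ hi hB (by push_cast; omega)]
              push_cast; ring_nf
            · rw [hfm, fm_gt cs i _ hi hB (by push_cast; omega)]
              push_cast; ring_nf
          · intro q hq
            rw [PySem.Dict.get?_insert] at hq
            by_cases hqt : q = t
            · omega
            · simp only [if_neg hqt] at hq; have := hmlt q hq; omega
          · intro q v hv
            rw [PySem.Dict.get?_insert] at hv
            by_cases hqt : q = t
            · subst hqt
              simp at hv
              subst hv
              refine ⟨htnotin, ?_, ?_⟩
              · rw [htop_f, fm_gt_ret cs i hi hB]
              · rw [htop_c, ccit_gt_ret cs i _ hi hB]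
            · simp only [if_neg hqt] at hv
              obtain ⟨hq1, hq2, hq3⟩ := h3 q v hv
              exact ⟨fun hmem => hq1 (List.mem_cons_of_mem _ hmem), hq2, hq3⟩
          · intro q hq hq' hcq
            rcases Nat.lt_succ_iff_lt_or_eq.mp hq with hq2 | rfl
            · rcases h4 q hq2 hq' hcq with hmem | hsome
              · rcases List.mem_cons.mp hmem with rfl | hmem'
                · exact Or.inr (by rw [PySem.Dict.get?_insert_self]; rfl)
                · exact Or.inl hmem'
              · refine Or.inr ?_
                obtain ⟨v, hv⟩ := Option.isSome_iff_exists.mp hsome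
                by_cases hqt : q = t
                · rw [hqt, PySem.Dict.get?_insert_self]; rfl
                · rw [PySem.Dict.get?_insert, if_neg hqt, hv]; rfl
            · exact absurd hcq (by rw [hB]; decide)
      · by_cases hC : cs[i] = ','
        · cases st with
          | nil =>
            simp only [pass1, if_neg hA, if_neg hB, if_pos hC]
            refine ih (i + 1) [] cd md (by omega) hnd (by simp)
              (by intro j hj; simp at hj) (fun q hq => by have := hmlt q hq; omega) h3 ?_ p hp hc
            intro q hq hq' hcq
            rcases Nat.lt_succ_iff_lt_or_eq.mp hq with hq2 | rfl
            · rcases h4 q hq2 hq' hcq with hmem | hsome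
              · simp at hmem
              · exact Or.inr hsome
            · exact absurd hcq (by rw [hC]; decide)
          | cons t st' =>
            simp only [pass1, if_neg hA, if_neg hB, if_pos hC]
            have htnotin : t ∉ st' := (List.nodup_cons.mp hnd).1
            refine ih (i + 1) (t :: st') (cd.modify t 0 (· + 1)) md (by omega) hnd
              (fun q hq => by have := hst q hq; exact ⟨by omega, this.2⟩) ?_ ?_ ?_ ?_ p hp hc
            · intro j hj
              match j with
              | 0 =>
                obtain ⟨hcc, hfm⟩ := h1 0 hj
                simp only [List.getElem_cons_zero] at hcc hfm ⊢
                norm_num at hcc hfm ⊢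
                constructor
                · rw [hcc, ccit_comma1 cs i _ hi hC]
                · rw [hfm, fm_other cs i 1 hi hA hB]
              | j + 1 =>
                obtain ⟨hcc, hfm⟩ := h1 (j + 1) hj
                simp only [List.getElem_cons_succ] at hcc hfm ⊢
                have hjlt : j < st'.length := by simpa using hj
                have hne : st'[j] ≠ t := fun hEq => htnotin (hEq ▸ List.getElem_mem hjlt)
                rw [PySem.Dict.getD_modify_of_ne _ _ _ hne]
                exact ⟨by rw [hcc, ccit_other cs i _ _ hi hA hB (by push_cast; omega)],
                       by rw [hfm, fm_other cs i _ hi hA hB]⟩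
            · exact fun q hq => by have := hmlt q hq; omega
            · intro q v hv
              obtain ⟨hq1, hq2, hq3⟩ := h3 q v hv
              have hqt : q ≠ t := fun hEq => hq1 (hEq ▸ List.mem_cons_self)
              exact ⟨hq1, hq2, by rw [PySem.Dict.getD_modify_of_ne _ _ _ hqt, hq3]⟩
            · intro q hq hq' hcq
              rcases Nat.lt_succ_iff_lt_or_eq.mp hq with hq2 | rfl
              · exact h4 q hq2 hq' hcq
              · exact absurd hcq (by rw [hC]; decide)
        · simp only [pass1, if_neg hA, if_neg hB, if_neg hC]
          refine ih (i + 1) st cd md (by omega) hnd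
            (fun q hq => by have := hst q hq; exact ⟨by omega, this.2⟩) ?_ ?_ ?_ ?_ p hp hc
          · intro j hj
            obtain ⟨hcc, hfm⟩ := h1 j hj
            constructor
            · rw [hcc, ccit_other cs i _ _ hi hA hB (fun hand => hC hand.1)]
            · rw [hfm, fm_other cs i _ hi hA hB]
          · exact fun q hq => by have := hmlt q hq; omega
          · exact h3
          · intro q hq hq' hcq
            rcases Nat.lt_succ_iff_lt_or_eq.mp hq with hq2 | rfl
            · exact h4 q hq2 hq' hcq
            · exact absurd hcq hA

lemma pass1_correct (cs : List Char) (p : Nat) (hp : p < cs.length) (hc : cs[p] = '<') :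
    (pass1 cs 0 [] PySem.Dict.empty PySem.Dict.empty).1.getD p 0 = ccit cs p 0 0 ∧
    (pass1 cs 0 [] PySem.Dict.empty PySem.Dict.empty).2.get? p = fm cs p 0 := by
  have := pass1_correct_aux cs cs.length 0 [] PySem.Dict.empty PySem.Dict.empty
    (by omega) (by simp) (by simp) (by simp) (by simp [PySem.Dict.get?_empty])
    (by simp [PySem.Dict.get?_empty]) (by omega) p hp hc
  simpa using this

-- the two emit loops agree step by step once the tables are right
lemma loops_eq (cs : List Char) (cd md : PySem.Dict Nat Nat)
    (ht : ∀ p (hp : p < cs.length), cs[p] = '<' →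
      cd.getD p 0 = ccit cs p 0 0 ∧ md.get? p = fm cs p 0) :
    ∀ (fuel i : Nat) (indent : Int) (acc : List Char),
      loopA cs fuel i indent acc = loopB cs cd md fuel i indent acc := by
  intro fuel
  induction fuel with
  | zero => intro i indent acc; rfl
  | succ fuel ih =>
    intro i indent acc
    rw [loopA, loopB]
    by_cases h : i < cs.length
    · simp only [dif_pos h]
      by_cases h1 : cs[i] = '<'
      · obtain ⟨e1, e2⟩ := ht i h h1
        simp only [if_pos h1, e1, e2]
        by_cases hz : ccit cs i 0 0 = 0
        · simp only [if_pos hz]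
          cases hfm : fm cs i 0 with
          | none => exact ih (i + 1) indent acc
          | some j => exact ih (j + 1) indent _
        · simp only [if_neg hz]; exact ih (i + 1) _ _
      · simp only [if_neg h1]
        by_cases h2 : cs[i] = '>'
        · simp only [if_pos h2]; exact ih (i + 1) _ _
        · simp only [if_neg h2]
          by_cases h3 : cs[i] = ','
          · simp only [if_pos h3]
            by_cases h4 : i + 1 < cs.length ∧ cs.getD (i + 1) ' ' = ' '
            · simp only [if_pos h4]; exact ih (i + 2) _ _
            · simp only [if_neg h4]; exact ih (i + 1) _ _
          · simp only [if_neg h3]; exact ih (i + 1) _ _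
    · simp only [dif_neg h]

-- ===== VERDICT (by name: the statement is the Claim_ definition above) =====
theorem format_cpp_type_spec : Claim_equal_format_cpp_type := by
  intro text _
  unfold Spec_format_cpp_type format_cpp_type format_cpp_type_alt
  have h := loops_eq text.toList
    (pass1 text.toList 0 [] PySem.Dict.empty PySem.Dict.empty).1
    (pass1 text.toList 0 [] PySem.Dict.empty PySem.Dict.empty).2
    (fun p hp hc => pass1_correct text.toList p hp hc)
    (text.toList.length + 1) 0 0 []
  simp only [h]
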